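-- pv_equiv track=rewrite | github.com/abhishekug99/github.com-abhishekug99-LeetCodeAbhishek | Ramp-OA-Bank-Request-Balance-Automation/ip-request-handling.py | solution
-- ===== SOURCE A (Python) =====
-- from collections import deque
--
-- def solution(timestamps, ipAddresses, limit, timeWindow):
--
--     requests_per_ip = {}  # Maps IP -> deque of timestamps for accepted requests
--     results = []
--
--     for t, ip in zip(timestamps, ipAddresses):
--         if ip not in requests_per_ip:
--             requests_per_ip[ip] = deque()
--
--         while requests_per_ip[ip] and (t - requests_per_ip[ip][0]) > timeWindow:
--             requests_per_ip[ip].popleft()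
--
--         if len(requests_per_ip[ip]) < limit:
--             results.append(1)
--             requests_per_ip[ip].append(t)
--         else:
--             results.append(0)
--
--     return results
-- ===== SOURCE B (Python) =====
-- def solution(timestamps, ipAddresses, limit, timeWindow):
--     # Group the request stream per IP once, then rate-limit each IP's
--     # subsequence independently (append-only log + head pointer instead of a
--     # deque), scattering the 0/1 answers back into a preallocated result list.
--     events = list(zip(timestamps, ipAddresses))
--     groups = {}
--     for i, (t, ip) in enumerate(events):
--         groups.setdefault(ip, []).append((i, t))
--     results = [0] * len(events)
--     for grp in groups.values():
--         acc = []    # accepted timestamps of this IP, in order; never deleted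
--         head = 0    # acc[head:] is the still-unexpired window
--         for i, t in grp:
--             while head < len(acc) and t - acc[head] > timeWindow:
--                 head += 1
--             if len(acc) - head < limit:
--                 results[i] = 1
--                 acc.append(t)
--             else:
--                 results[i] = 0
--     return results
-- ===== Notes on version B (the rewrite author's own statement) =====
-- stated objective: alternative
-- what changed: Instead of streaming all requests through one dict of per-IP deques with destructive while-popleft eviction, B groups the request indices per IP in one pass, rate-limits each IP's subsequence independently with an append-only log plus head pointer (lazy eviction, nothing is ever deleted), and scatters the 0/1 answers back into a preallocated result list.
import Mathlib
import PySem

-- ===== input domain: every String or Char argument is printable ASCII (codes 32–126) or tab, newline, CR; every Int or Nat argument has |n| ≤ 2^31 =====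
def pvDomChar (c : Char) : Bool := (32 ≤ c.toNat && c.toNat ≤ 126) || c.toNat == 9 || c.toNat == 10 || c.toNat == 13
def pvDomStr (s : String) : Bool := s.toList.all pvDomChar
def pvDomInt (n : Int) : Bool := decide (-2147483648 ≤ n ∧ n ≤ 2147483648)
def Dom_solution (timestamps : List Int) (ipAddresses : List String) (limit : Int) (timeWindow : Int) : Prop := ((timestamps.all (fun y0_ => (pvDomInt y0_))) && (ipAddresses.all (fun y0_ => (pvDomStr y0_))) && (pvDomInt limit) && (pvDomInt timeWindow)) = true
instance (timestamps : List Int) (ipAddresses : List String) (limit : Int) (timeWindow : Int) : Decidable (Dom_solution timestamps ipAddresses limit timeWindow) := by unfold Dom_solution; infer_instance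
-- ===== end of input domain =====

-- B groups the request stream per IP once and rate-limits each IP's subsequence independently
-- (append-only log + head pointer, results scattered into a preallocated list) instead of
-- streaming everything through one dict of per-IP deques with while-popleft eviction (alternative).

-- ===== PORT A =====
-- the `while requests_per_ip[ip] and (t - requests_per_ip[ip][0]) > timeWindow: popleft()` loop
def dropExpired (t timeWindow : Int) : List Int → List Int
  | [] => []
  | x :: xs => if t - x > timeWindow then dropExpired t timeWindow xs else x :: xs

-- one iteration of A's `for t, ip in zip(...)` body; state = (requests_per_ip, results)
def stepA (limit timeWindow : Int) (st : PySem.Dict String (List Int) × List Int)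
    (p : Int × String) : PySem.Dict String (List Int) × List Int :=
  let t := p.1
  let ip := p.2
  let d := if st.1.contains ip then st.1 else st.1.insert ip []   -- if ip not in dict: dict[ip] = deque()
  let q := dropExpired t timeWindow (d.getD ip [])                -- the while-popleft loop mutates dict[ip]
  if (q.length : Int) < limit then (d.insert ip (q ++ [t]), st.2 ++ [1])
  else (d.insert ip q, st.2 ++ [0])

def solution (timestamps : List Int) (ipAddresses : List String) (limit : Int) (timeWindow : Int) : List Int :=
  ((timestamps.zip ipAddresses).foldl (stepA limit timeWindow) (PySem.Dict.empty, [])).2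

-- ===== PORT B =====
-- B's `while head < len(acc) and t - acc[head] > timeWindow: head += 1` loop
def advanceHead (t timeWindow : Int) (acc : List Int) (head : Nat) : Nat :=
  if h : head < acc.length then
    if t - acc[head] > timeWindow then advanceHead t timeWindow acc (head + 1) else head
  else head
termination_by acc.length - head

-- one iteration of B's inner `for i, t in grp` loop; state = (acc, head, results);
-- results[i] = b is PySem.List.pySetD (the grouping pass only produces in-range indices)
def stepG (limit timeWindow : Int) (st : List Int × Nat × List Int)
    (p : Int × Int) : List Int × Nat × List Int :=
  let head := advanceHead p.2 timeWindow st.1 st.2.1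
  if (st.1.length : Int) - (head : Int) < limit then
    (st.1 ++ [p.2], head, PySem.List.pySetD st.2.2 p.1 1)
  else (st.1, head, PySem.List.pySetD st.2.2 p.1 0)

def solution_alt (timestamps : List Int) (ipAddresses : List String) (limit : Int) (timeWindow : Int) : List Int :=
  let events := timestamps.zip ipAddresses
  -- groups.setdefault(ip, []).append((i, t))  over  enumerate(events)
  let groups := (PySem.List.enumerate events).foldl
      (fun (g : PySem.Dict String (List (Int × Int))) e => g.modify e.2.2 [] (· ++ [(e.1, e.2.1)]))
      PySem.Dict.empty
  groups.values.foldl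
    (fun results grp => (grp.foldl (stepG limit timeWindow) ([], 0, results)).2.2)
    (List.replicate events.length 0)

-- ===== PRECONDITION & SPEC =====
def Spec_solution (timestamps : List Int) (ipAddresses : List String) (limit : Int) (timeWindow : Int) (out : List Int) : Prop := out = solution_alt timestamps ipAddresses limit timeWindow
instance (timestamps : List Int) (ipAddresses : List String) (limit : Int) (timeWindow : Int) (out : List Int) : Decidable (Spec_solution timestamps ipAddresses limit timeWindow out) := by unfold Spec_solution; infer_instance

-- ===== CLAIM (what is proved, stated in full; the proofs are below) =====
def Claim_equal_solution : Prop := ∀ (timestamps : List Int) (ipAddresses : List String) (limit : Int) (timeWindow : Int), Dom_solution timestamps ipAddresses limit timeWindow → Spec_solution timestamps ipAddresses limit timeWindow (solution timestamps ipAddresses limit timeWindow)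

-- ===== LEMMAS AND PROOFS =====

-- per-IP rate limiting on one IP's timestamp subsequence, queue-based (the reference semantics)
def bitsG (lim tw : Int) : List Int → List Int → List Int
  | [], _ => []
  | t :: ts, q =>
    let q' := dropExpired t tw q
    if (q'.length : Int) < lim then 1 :: bitsG lim tw ts (q' ++ [t])
    else 0 :: bitsG lim tw ts q'

-- A's loop, cons-accumulating
def bitsA (lim tw : Int) : List (Int × String) → PySem.Dict String (List Int) → List Int
  | [], _ => []
  | p :: rest, d =>
    let d1 := if d.contains p.2 then d else d.insert p.2 []
    let q := dropExpired p.1 tw (d1.getD p.2 [])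
    if (q.length : Int) < lim then 1 :: bitsA lim tw rest (d1.insert p.2 (q ++ [p.1]))
    else 0 :: bitsA lim tw rest (d1.insert p.2 q)

def writeAll (res : List Int) (qs : List (Int × Int)) : List Int :=
  qs.foldl (fun r q => PySem.List.pySetD r q.1 q.2) res

def tsOf (ip : String) (l : List (Int × String)) : List Int :=
  (l.filter (fun p => p.2 == ip)).map (·.1)

def cnt (ip : String) (l : List (Int × String)) (j : Nat) : Nat :=
  ((l.take j).filter (fun p => p.2 == ip)).length

lemma bitsA_bridge (lim tw : Int) : ∀ (l : List (Int × String)) d acc,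
    (l.foldl (stepA lim tw) (d, acc)).2 = acc ++ bitsA lim tw l d := by
  intro l
  induction l with
  | nil => intro d acc; simp [bitsA]
  | cons p rest ih =>
      intro d acc
      simp only [List.foldl_cons, stepA, bitsA]
      split_ifs <;> rw [ih] <;> simp

lemma bitsA_length (lim tw : Int) : ∀ (l : List (Int × String)) d,
    (bitsA lim tw l d).length = l.length := by
  intro l
  induction l with
  | nil => intro d; simp [bitsA]
  | cons p rest ih =>
      intro d
      simp only [bitsA]
      split_ifs with h <;> simp [ih]

lemma getD_ensure (d : PySem.Dict String (List Int)) (ip k : String) :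
    ((if d.contains ip then d else d.insert ip []).getD k []) = d.getD k [] := by
  by_cases hc : d.contains ip
  · rw [if_pos hc]
  · rw [if_neg hc, PySem.Dict.getD_insert]
    split_ifs with hk
    · subst hk; exact (PySem.Dict.getD_of_not_contains d [] (by simpa using hc)).symm
    · rfl

lemma bitsA_point (lim tw : Int) : ∀ (l : List (Int × String)) d (j : Nat) (hj : j < l.length),
    (bitsA lim tw l d).getD j 0 =
      (bitsG lim tw (tsOf l[j].2 l) (d.getD l[j].2 [])).getD (cnt l[j].2 l j) 0 := by
  intro l
  induction l with
  | nil => intro d j hj; simp at hj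
  | cons p rest ih =>
      intro d j hj
      have hd1 := getD_ensure d p.2
      cases j with
      | zero =>
          have hts : tsOf p.2 (p :: rest) = p.1 :: tsOf p.2 rest := by simp [tsOf]
          have hcnt : cnt p.2 (p :: rest) 0 = 0 := by simp [cnt]
          simp only [List.getElem_cons_zero, hts, hcnt, bitsA, bitsG, hd1]
          split_ifs with h <;> simp
      | succ j =>
          have hj' : j < rest.length := by simpa using hj
          simp only [List.getElem_cons_succ]
          by_cases hpip : p.2 = rest[j].2
          · rw [← hpip]
            have hts : tsOf p.2 (p :: rest) = p.1 :: tsOf p.2 rest := by simp [tsOf]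
            have hcnt : cnt p.2 (p :: rest) (j + 1) = cnt p.2 rest j + 1 := by simp [cnt]
            rw [hts, hcnt]
            simp only [bitsA, bitsG]
            set D := if d.contains p.2 = true then d else d.insert p.2 [] with hD
            have hDget : ∀ k, D.getD k [] = d.getD k [] := by
              rw [hD]; exact getD_ensure d p.2
            simp only [hDget]
            split_ifs with h
            · rw [List.getD_cons_succ, List.getD_cons_succ, ih _ j hj', ← hpip,
                PySem.Dict.getD_insert, if_pos rfl]
            · rw [List.getD_cons_succ, List.getD_cons_succ, ih _ j hj', ← hpip,
                PySem.Dict.getD_insert, if_pos rfl]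
          · have hts : tsOf rest[j].2 (p :: rest) = tsOf rest[j].2 rest := by
              simp [tsOf, List.filter_cons,
                show (p.2 == rest[j].2) = false by simpa using hpip]
            have hcnt : cnt rest[j].2 (p :: rest) (j + 1) = cnt rest[j].2 rest j := by
              simp [cnt, show (p.2 == rest[j].2) = false by simpa using hpip]
            rw [hts, hcnt]
            simp only [bitsA]
            set D := if d.contains p.2 = true then d else d.insert p.2 [] with hD
            have hDget : ∀ k, D.getD k [] = d.getD k [] := by
              rw [hD]; exact getD_ensure d p.2
            simp only [hDget]
            split_ifs with h
            · rw [List.getD_cons_succ, ih _ j hj', PySem.Dict.getD_insert,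
                if_neg (fun hh => hpip hh.symm), hDget]
            · rw [List.getD_cons_succ, ih _ j hj', PySem.Dict.getD_insert,
                if_neg (fun hh => hpip hh.symm), hDget]

lemma advanceHead_spec (t tw : Int) : ∀ (n : Nat) (acc : List Int) (head : Nat),
    acc.length - head ≤ n → head ≤ acc.length →
    advanceHead t tw acc head ≤ acc.length ∧
    acc.drop (advanceHead t tw acc head) = dropExpired t tw (acc.drop head) := by
  intro n
  induction n with
  | zero =>
      intro acc head hn hh
      have : head = acc.length := by omega
      subst this
      rw [advanceHead]
      simp [dropExpired]
  | succ n ih =>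
      intro acc head hn hh
      by_cases h : head < acc.length
      · have hdrop : acc.drop head = acc[head] :: acc.drop (head + 1) :=
          (List.getElem_cons_drop h).symm
        rw [advanceHead, dif_pos h]
        by_cases hexp : t - acc[head] > tw
        · rw [if_pos hexp]
          have := ih acc (head + 1) (by omega) (by omega)
          refine ⟨this.1, ?_⟩
          rw [this.2, hdrop, dropExpired, if_pos hexp]
        · rw [if_neg hexp, hdrop, dropExpired, if_neg hexp]
          exact ⟨by omega, rfl⟩
      · have : head = acc.length := by omega
        subst this
        rw [advanceHead, dif_neg h]
        simp [dropExpired]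

lemma bitsG_length (lim tw : Int) : ∀ (ts q : List Int), (bitsG lim tw ts q).length = ts.length := by
  intro ts
  induction ts with
  | nil => intro q; simp [bitsG]
  | cons t ts ih =>
      intro q
      simp only [bitsG]
      split_ifs with h <;> simp [ih]

lemma scatter_eq (lim tw : Int) : ∀ (pairs : List (Int × Int)) (acc : List Int) (head : Nat)
    (res : List Int), head ≤ acc.length →
    (pairs.foldl (stepG lim tw) (acc, head, res)).2.2 =
      writeAll res ((pairs.map (·.1)).zip (bitsG lim tw (pairs.map (·.2)) (acc.drop head))) := by
  intro pairs
  induction pairs with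
  | nil => intro acc head res _; simp [writeAll]
  | cons p rest ih =>
      intro acc head res hh
      obtain ⟨h1, h2⟩ := advanceHead_spec p.2 tw (acc.length - head) acc head le_rfl hh
      have hlendrop : (acc.drop (advanceHead p.2 tw acc head)).length =
          acc.length - advanceHead p.2 tw acc head := by simp
      have hlen : (dropExpired p.2 tw (acc.drop head)).length =
          acc.length - advanceHead p.2 tw acc head := by rw [← h2]; simp
      have hcond : ((acc.length : Int) - (advanceHead p.2 tw acc head : Int) < lim) ↔
          (((dropExpired p.2 tw (acc.drop head)).length : Int) < lim) := by
        rw [hlen]; constructor <;> intro h <;> omega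
      simp only [List.foldl_cons, List.map_cons, bitsG, stepG]
      split_ifs with hA hB hB
      · -- both accept
        rw [ih (acc ++ [p.2]) (advanceHead p.2 tw acc head) (PySem.List.pySetD res p.1 1)
          (by simp; omega)]
        have : (acc ++ [p.2]).drop (advanceHead p.2 tw acc head) =
            dropExpired p.2 tw (acc.drop head) ++ [p.2] := by
          rw [List.drop_append_of_le_length h1, h2]
        rw [this]
        rfl
      · exact absurd (hcond.mp hA) hB
      · exact absurd (hcond.mpr hB) hA
      · -- both reject
        rw [ih acc (advanceHead p.2 tw acc head) (PySem.List.pySetD res p.1 0) h1, h2]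
        rfl

lemma writeAll_length : ∀ (qs : List (Int × Int)) (res : List Int),
    (writeAll res qs).length = res.length := by
  intro qs
  induction qs with
  | nil => intro res; simp [writeAll]
  | cons q qs ih =>
      intro res
      simp only [writeAll, List.foldl_cons]
      rw [show (qs.foldl (fun r q => PySem.List.pySetD r q.1 q.2)
        (PySem.List.pySetD res q.1 q.2)) = writeAll (PySem.List.pySetD res q.1 q.2) qs from rfl,
        ih, PySem.List.length_pySetD]

lemma writeAll_other : ∀ (qs : List (Int × Int)) (res : List Int) (j : Nat),
    (∀ q ∈ qs, 0 ≤ q.1) → (∀ q ∈ qs, q.1 ≠ (j : Int)) →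
    (writeAll res qs).getD j 0 = res.getD j 0 := by
  intro qs
  induction qs with
  | nil => intro res j _ _; rfl
  | cons q qs ih =>
      intro res j hpos hne
      have h0 : writeAll res (q :: qs) = writeAll (PySem.List.pySetD res q.1 q.2) qs := rfl
      rw [h0, ih _ j (fun a ha => hpos a (by simp [ha])) (fun a ha => hne a (by simp [ha]))]
      rw [PySem.List.pySetD_of_nonneg res q.2 (hpos q (by simp))]
      have hij : q.1.toNat ≠ j := by
        have h1 := hne q (by simp)
        have h2 := hpos q (by simp)
        omega
      rcases Nat.lt_or_ge j res.length with hj | hj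
      · rw [List.getD_eq_getElem _ _ (show j < (res.set q.1.toNat q.2).length by simpa using hj),
          List.getD_eq_getElem _ _ hj, List.getElem_set_ne hij]
      · rw [List.getD_eq_default _ _ (by simpa using hj), List.getD_eq_default _ _ hj]

lemma writeAll_at : ∀ (qs : List (Int × Int)) (res : List Int) (j : Nat) (v : Int),
    (∀ q ∈ qs, 0 ≤ q.1) → (qs.map (·.1)).Nodup → ((j : Int), v) ∈ qs → j < res.length →
    (writeAll res qs).getD j 0 = v := by
  intro qs
  induction qs with
  | nil => intro res j v _ _ hmem _; simp at hmem
  | cons q qs ih =>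
      intro res j v hpos hnd hmem hlt
      have h0 : writeAll res (q :: qs) = writeAll (PySem.List.pySetD res q.1 q.2) qs := rfl
      rw [h0]
      have hnd' : (qs.map (·.1)).Nodup := (List.nodup_cons.mp (by simpa using hnd)).2
      have hq1 : q.1 ∉ qs.map (·.1) := (List.nodup_cons.mp (by simpa using hnd)).1
      rcases List.mem_cons.mp hmem with heq | hmem'
      · have hj1 : q.1 = (j : Int) := by rw [← heq]
        have hv : q.2 = v := by rw [← heq]
        have hne : ∀ a ∈ qs, a.1 ≠ (j : Int) := by
          intro a ha hja
          exact hq1 (by rw [hj1, ← hja]; exact List.mem_map_of_mem ha)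
        rw [writeAll_other qs _ j (fun a ha => hpos a (by simp [ha])) hne]
        rw [PySem.List.pySetD_of_nonneg res q.2 (hpos q (by simp)), hj1]
        have : ((j : Int)).toNat = j := by omega
        rw [this, List.getD_eq_getElem _ _ (show j < (res.set j q.2).length by simpa using hlt),
          List.getElem_set_self]
        exact hv
      · exact ih _ j v (fun a ha => hpos a (by simp [ha])) hnd' hmem'
          (by simpa using hlt)

lemma groups_getD (el : List (Int × (Int × String))) (g : PySem.Dict String (List (Int × Int)))
    (ip : String) :
    (el.foldl (fun g e => g.modify e.2.2 [] (· ++ [(e.1, e.2.1)])) g).getD ip [] =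
      g.getD ip [] ++ (el.filter (fun e => e.2.2 == ip)).map (fun e => (e.1, e.2.1)) := by
  induction el generalizing g with
  | nil => simp
  | cons e el ih =>
      simp only [List.foldl_cons, List.filter_cons]
      rw [ih, PySem.Dict.getD_modify]
      by_cases h : e.2.2 = ip
      · rw [if_pos h.symm]
        simp [h]
      · rw [if_neg (fun hh => h hh.symm)]
        have hb : (e.2.2 == ip) = false := by simpa using h
        simp [hb]

lemma enum_filter_map_snd (ip : String) : ∀ (l : List (Int × String)) (s : Int),
    ((PySem.List.enumerate l s).filter (fun e => e.2.2 == ip)).map (fun e => e.2.1) =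
      tsOf ip l := by
  intro l
  induction l with
  | nil => intro s; simp [PySem.List.enumerate, tsOf]
  | cons p rest ih =>
      intro s
      have ih' := ih (s + 1)
      simp only [tsOf] at ih' ⊢
      simp only [PySem.List.enumerate, List.filter_cons]
      by_cases h : p.2 = ip
      · have hb : (p.2 == ip) = true := by simpa using h
        simp [hb, ih']
      · have hb : (p.2 == ip) = false := by simpa using h
        simp [hb, ih']

-- the k-th occurrence of ip in l sits at enumerate-index s + j with cnt ip l j = k
lemma enum_filter_rank (ip : String) : ∀ (l : List (Int × String)) (s : Int) (j : Nat)
    (hj : j < l.length), l[j].2 = ip →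
    ∃ k : Nat, (((PySem.List.enumerate l s).filter (fun e => e.2.2 == ip)).map (·.1))[k]? =
        some (s + (j : Int)) ∧ cnt ip l j = k := by
  intro l
  induction l with
  | nil => intro s j hj; simp at hj
  | cons p rest ih =>
      intro s j hj hip
      cases j with
      | zero =>
          have hb : (p.2 == ip) = true := by simpa using hip
          refine ⟨0, ?_, ?_⟩
          · simp [PySem.List.enumerate, List.filter_cons, hb]
          · simp [cnt]
      | succ j =>
          have hj' : j < rest.length := by simpa using hj
          have hip' : rest[j].2 = ip := by simpa using hip
          obtain ⟨k, hk1, hk2⟩ := ih (s + 1) j hj' hip'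
          by_cases h : p.2 = ip
          · have hb : (p.2 == ip) = true := by simpa using h
            refine ⟨k + 1, ?_, ?_⟩
            · have hcons : ((PySem.List.enumerate (p :: rest) s).filter
                    (fun e => e.2.2 == ip)).map (·.1) =
                  s :: ((PySem.List.enumerate rest (s + 1)).filter
                    (fun e => e.2.2 == ip)).map (·.1) := by
                simp [PySem.List.enumerate, hb]
              rw [hcons, List.getElem?_cons_succ, hk1]
              congr 1
              push_cast
              ring
            · have hcnt : cnt ip (p :: rest) (j + 1) = cnt ip rest j + 1 := by
                simp [cnt, hb]
              rw [hcnt, hk2]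
          · have hb : (p.2 == ip) = false := by simpa using h
            refine ⟨k, ?_, ?_⟩
            · have hcons : ((PySem.List.enumerate (p :: rest) s).filter
                    (fun e => e.2.2 == ip)).map (·.1) =
                  ((PySem.List.enumerate rest (s + 1)).filter
                    (fun e => e.2.2 == ip)).map (·.1) := by
                simp [PySem.List.enumerate, hb]
              rw [hcons, hk1]
              congr 1
              push_cast
              ring
            · have hcnt : cnt ip (p :: rest) (j + 1) = cnt ip rest j := by
                simp [cnt, hb]
              rw [hcnt, hk2]

lemma enum_filter_fst_mem (ip : String) : ∀ (l : List (Int × String)) (s : Int) (i : Int),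
    i ∈ ((PySem.List.enumerate l s).filter (fun e => e.2.2 == ip)).map (·.1) →
    ∃ (j : Nat) (hj : j < l.length), i = s + (j : Int) ∧ (l[j]'hj).2 = ip := by
  intro l s i hmem
  obtain ⟨e, he, hei⟩ := List.mem_map.mp hmem
  obtain ⟨heen, hip⟩ := List.mem_filter.mp he
  obtain ⟨k, hk, hek⟩ := (PySem.List.mem_enumerate_iff l s e).mp heen
  subst hek
  exact ⟨k, hk, hei.symm, by simpa using hip⟩

-- B's grouping dict and outer loop, named for the proofs
def mkGroups (l : List (Int × String)) : PySem.Dict String (List (Int × Int)) :=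
  (PySem.List.enumerate l).foldl
    (fun g e => g.modify e.2.2 [] (· ++ [(e.1, e.2.1)])) PySem.Dict.empty

def scatterFold (lim tw : Int) (l : List (Int × String)) (ks : List String)
    (res : List Int) : List Int :=
  ks.foldl (fun r ip => (((mkGroups l).getD ip []).foldl (stepG lim tw) ([], 0, r)).2.2) res

lemma mkGroups_getD (l : List (Int × String)) (ip : String) :
    (mkGroups l).getD ip [] =
      ((PySem.List.enumerate l).filter (fun e => e.2.2 == ip)).map (fun e => (e.1, e.2.1)) := by
  rw [mkGroups, groups_getD]
  simp

lemma map_pair_snd (l : List (Int × String)) (ip : String) :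
    (((PySem.List.enumerate l).filter (fun e => e.2.2 == ip)).map
        (fun e => (e.1, e.2.1))).map (·.2) = tsOf ip l := by
  rw [List.map_map]
  exact enum_filter_map_snd ip l 0

lemma group_write (lim tw : Int) (l : List (Int × String)) (ip : String) (res : List Int) :
    (((mkGroups l).getD ip []).foldl (stepG lim tw) ([], 0, res)).2.2 =
      writeAll res ((((PySem.List.enumerate l).filter (fun e => e.2.2 == ip)).map (·.1)).zip
        (bitsG lim tw (tsOf ip l) [])) := by
  rw [mkGroups_getD, scatter_eq lim tw _ [] 0 res (le_refl 0)]
  have h1 : (((PySem.List.enumerate l).filter (fun e => e.2.2 == ip)).map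
      (fun e => (e.1, e.2.1))).map (·.1) =
      ((PySem.List.enumerate l).filter (fun e => e.2.2 == ip)).map (·.1) := by
    rw [List.map_map]; rfl
  rw [h1, map_pair_snd]
  rfl

lemma firsts_nodup (l : List (Int × String)) (ip : String) :
    (((PySem.List.enumerate l).filter (fun e => e.2.2 == ip)).map (·.1)).Nodup := by
  have hpw := PySem.List.pairwise_lt_enumerate l 0
  have h1 : ((PySem.List.enumerate l).filter (fun e => e.2.2 == ip)).Pairwise
      (fun p q => p.1 < q.1) := hpw.sublist List.filter_sublist
  have h2 : (((PySem.List.enumerate l).filter (fun e => e.2.2 == ip)).map (·.1)).Pairwise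
      (· < ·) := List.pairwise_map.mpr h1
  exact h2.imp (fun h => LT.lt.ne h)

lemma firsts_length (lim tw : Int) (l : List (Int × String)) (ip : String) :
    (((PySem.List.enumerate l).filter (fun e => e.2.2 == ip)).map (·.1)).length =
      (bitsG lim tw (tsOf ip l) []).length := by
  rw [bitsG_length, ← map_pair_snd l ip]
  simp

lemma scatterFold_spec (lim tw : Int) (l : List (Int × String)) :
    ∀ (ks : List String) (res : List Int), res.length = l.length →
      (scatterFold lim tw l ks res).length = l.length ∧
      ∀ (j : Nat) (hj : j < l.length),
        (l[j].2 ∈ ks → (scatterFold lim tw l ks res).getD j 0 =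
          (bitsG lim tw (tsOf l[j].2 l) []).getD (cnt l[j].2 l j) 0) ∧
        (l[j].2 ∉ ks → (scatterFold lim tw l ks res).getD j 0 = res.getD j 0) := by
  intro ks
  induction ks with
  | nil =>
      intro res hlen
      exact ⟨hlen, fun j hj => ⟨fun h => absurd h List.not_mem_nil, fun _ => rfl⟩⟩
  | cons ip ks ih =>
      intro res hlen
      set Z := (((PySem.List.enumerate l).filter (fun e => e.2.2 == ip)).map (·.1)).zip
          (bitsG lim tw (tsOf ip l) []) with hZ
      have hstep : scatterFold lim tw l (ip :: ks) res =
          scatterFold lim tw l ks (writeAll res Z) := by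
        show scatterFold lim tw l ks
          ((((mkGroups l).getD ip []).foldl (stepG lim tw) ([], 0, res)).2.2) = _
        rw [group_write, ← hZ]
      have hZfst : Z.map (·.1) =
          ((PySem.List.enumerate l).filter (fun e => e.2.2 == ip)).map (·.1) := by
        rw [hZ]
        exact List.map_fst_zip (le_of_eq (firsts_length lim tw l ip))
      have hpos : ∀ q ∈ Z, 0 ≤ q.1 := by
        intro q hq
        have hm : q.1 ∈ Z.map (·.1) := List.mem_map_of_mem hq
        rw [hZfst] at hm
        obtain ⟨j', hj', hiq, _⟩ := enum_filter_fst_mem ip l 0 q.1 hm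
        omega
      have hnd : (Z.map (·.1)).Nodup := by rw [hZfst]; exact firsts_nodup l ip
      have hres1len : (writeAll res Z).length = l.length := by
        rw [writeAll_length]; exact hlen
      obtain ⟨hlen2, hpt⟩ := ih (writeAll res Z) hres1len
      rw [hstep]
      refine ⟨hlen2, fun j hj => ⟨?_, ?_⟩⟩
      · intro hmem
        by_cases hks : l[j].2 ∈ ks
        · exact (hpt j hj).1 hks
        · have hip : l[j].2 = ip := by
            rcases List.mem_cons.mp hmem with h | h
            · exact h
            · exact absurd h hks
          rw [(hpt j hj).2 hks]
          obtain ⟨k, hk1, hk2⟩ := enum_filter_rank ip l 0 j hj hip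
          obtain ⟨hklt, hkval⟩ := List.getElem?_eq_some_iff.mp hk1
          have hklt2 : k < (bitsG lim tw (tsOf ip l) []).length := by
            rw [← firsts_length lim tw l ip]; exact hklt
          have hzlen : k < Z.length := by
            rw [hZ, List.length_zip]; omega
          have hzmem : ((j : Int), (bitsG lim tw (tsOf ip l) [])[k]'hklt2) ∈ Z := by
            refine List.mem_iff_getElem.mpr ⟨k, hzlen, ?_⟩
            simp only [hZ, List.getElem_zip, Prod.mk.injEq]
            refine ⟨?_, trivial⟩
            rw [hkval]
            simp
          rw [writeAll_at Z res j _ hpos hnd hzmem (by rw [hlen]; exact hj)]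
          rw [hip, hk2, List.getD_eq_getElem _ _ hklt2]
      · intro hnm
        have hnip : l[j].2 ≠ ip := fun h => hnm (by rw [h]; exact List.mem_cons_self)
        have hnks : l[j].2 ∉ ks := fun h => hnm (List.mem_cons_of_mem _ h)
        rw [(hpt j hj).2 hnks]
        apply writeAll_other Z res j hpos
        intro q hq hqj
        have hm : q.1 ∈ Z.map (·.1) := List.mem_map_of_mem hq
        rw [hZfst] at hm
        obtain ⟨j', hj', hiq, hipj'⟩ := enum_filter_fst_mem ip l 0 q.1 hm
        have hjj : j' = j := by omega
        subst hjj
        exact hnip hipj'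

-- ===== VERDICT (by name: the statement is the Claim_ definition above) =====
theorem solution_spec : Claim_equal_solution := by
  intro timestamps ipAddresses limit timeWindow _
  unfold Spec_solution solution solution_alt
  set l := timestamps.zip ipAddresses with hl
  have hkeysnodup : (mkGroups l).keys.Nodup := by
    rw [mkGroups]
    exact PySem.Dict.nodup_keys_foldl_modify_key (PySem.List.enumerate l)
      (fun (e : Int × (Int × String)) => e.2.2) []
      (fun _ (e : Int × (Int × String)) => (· ++ [(e.1, e.2.1)])) PySem.Dict.empty
      (by rw [PySem.Dict.keys_empty]; exact List.nodup_nil)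
  have hAside : ((l.foldl (stepA limit timeWindow) (PySem.Dict.empty, [])).2) =
      bitsA limit timeWindow l PySem.Dict.empty := by
    rw [bitsA_bridge, List.nil_append]
  have hBside : (((PySem.List.enumerate l).foldl
        (fun (g : PySem.Dict String (List (Int × Int))) e =>
          g.modify e.2.2 [] (· ++ [(e.1, e.2.1)])) PySem.Dict.empty).values.foldl
        (fun results grp => (grp.foldl (stepG limit timeWindow) ([], 0, results)).2.2)
        (List.replicate l.length 0)) =
      scatterFold limit timeWindow l (mkGroups l).keys (List.replicate l.length 0) := by
    rw [show ((PySem.List.enumerate l).foldl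
        (fun (g : PySem.Dict String (List (Int × Int))) e =>
          g.modify e.2.2 [] (· ++ [(e.1, e.2.1)])) PySem.Dict.empty) = mkGroups l from rfl]
    rw [PySem.Dict.values_eq_map_keys (mkGroups l) hkeysnodup [], List.foldl_map]
    rfl
  rw [hAside, hBside]
  obtain ⟨hlen2, hpt⟩ := scatterFold_spec limit timeWindow l (mkGroups l).keys
    (List.replicate l.length 0) (by simp)
  apply List.ext_getElem
  · rw [bitsA_length, hlen2]
  · intro j h1 h2
    have hj : j < l.length := by rw [bitsA_length] at h1; exact h1
    have hmemkeys : l[j].2 ∈ (mkGroups l).keys := by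
      rw [mkGroups, PySem.Dict.keys_foldl_modify_key (PySem.List.enumerate l)
        (fun (e : Int × (Int × String)) => e.2.2) []
        (fun _ (e : Int × (Int × String)) => (· ++ [(e.1, e.2.1)])) PySem.Dict.empty]
      apply (PySem.Set.mem_update _ _ _).mpr
      right
      exact List.mem_map.mpr ⟨((0 : Int) + (j : Int), l[j]), (PySem.List.mem_enumerate_iff
        l 0 _).mpr ⟨j, hj, rfl⟩, rfl⟩
    have hA := bitsA_point limit timeWindow l PySem.Dict.empty j hj
    rw [PySem.Dict.getD_empty, List.getD_eq_getElem _ _ h1] at hA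
    have hB := (hpt j hj).1 hmemkeys
    rw [List.getD_eq_getElem _ _ h2] at hB
    exact hA.trans hB.symm
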